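-- pv_equiv track=rewrite | github.com/TsubasaKanemitsu/Atcoder_practice | ABC/C/182_2.py | solve
-- ===== SOURCE A (Python) =====
-- def solve(n):
--     INF = len(n)
--     res = INF
--     for bit in range(1 << len(n)):
--         sum, con = 0, 0
--         for i in range(len(n)):
--             if bit & (1 << i):
--                 con += 1
--             else:
--                 sum += n[i]
--         if sum % 3 == 0:
--             res = min(res, con)
--     return res if res < INF else -1
-- ===== SOURCE B (Python) =====
-- def solve(n):
--     L = len(n)
--     r = sum(n) % 3
--     if r == 0:
--         return 0 if L >= 1 else -1
--     c1 = 0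
--     c2 = 0
--     for x in n:
--         m = x % 3
--         if m == 1:
--             c1 += 1
--         elif m == 2:
--             c2 += 1
--     if r == 1:
--         if c1 >= 1 and L >= 2:
--             return 1
--         if c2 >= 2 and L >= 3:
--             return 2
--         return -1
--     else:
--         if c2 >= 1 and L >= 2:
--             return 1
--         if c1 >= 2 and L >= 3:
--             return 2
--         return -1
-- ===== Notes on version B (the rewrite author's own statement) =====
-- stated objective: faster
-- what changed: A enumerates all 2^L deletion bitmasks and minimizes; B computes the sum's residue mod 3 and the counts of digits with residue 1 and 2 in one pass, then returns 0/1/2/-1 by a constant-size case analysis (remove one digit of the sum's residue, else two of the other nonzero residue, keeping at least one digit).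
import Mathlib
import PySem

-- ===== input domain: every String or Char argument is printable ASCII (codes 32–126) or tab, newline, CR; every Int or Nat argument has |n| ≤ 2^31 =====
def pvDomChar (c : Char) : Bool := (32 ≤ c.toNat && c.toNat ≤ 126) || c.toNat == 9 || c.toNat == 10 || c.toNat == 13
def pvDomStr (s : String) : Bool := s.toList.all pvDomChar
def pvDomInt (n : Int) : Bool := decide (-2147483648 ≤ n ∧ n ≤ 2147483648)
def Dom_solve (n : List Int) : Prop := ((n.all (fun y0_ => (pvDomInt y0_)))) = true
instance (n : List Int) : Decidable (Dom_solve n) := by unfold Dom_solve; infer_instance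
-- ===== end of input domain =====

-- B replaces A's O(2^L·L) deletion-bitmask enumeration by an O(L) residue-count case analysis (faster, asymptotic).


-- ===== PORT A =====
-- literal port of A; shift amounts are Nat in Lean, so `1 << i` is `(1:Int) <<< i.toNat` (i ≥ 0 inside range(len(n)))
def solve (n : List Int) : Int :=
  let INF : Int := n.length
  let res : Int :=
    (PySem.List.pyRange 0 ((1 : Int) <<< n.length) 1).foldl
      (fun res bit =>
        let sc : Int × Int :=
          (PySem.List.pyRange 0 (n.length : Int) 1).foldl
            (fun sc i =>
              if PySem.Int.band bit ((1 : Int) <<< i.toNat) ≠ 0 then (sc.1, sc.2 + 1)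
              else (sc.1 + PySem.List.pyGetD n i 0, sc.2))
            (0, 0)
        if PySem.Int.mod sc.1 3 = 0 then min res sc.2 else res)
      INF
  if res < INF then res else -1

-- ===== PORT B =====
def solve_alt (n : List Int) : Int :=
  let L : Int := n.length
  let r := PySem.Int.mod n.sum 3
  if r = 0 then (if 1 ≤ L then 0 else -1)
  else
    let cc : Int × Int :=
      n.foldl
        (fun cc x =>
          let m := PySem.Int.mod x 3
          if m = 1 then (cc.1 + 1, cc.2) else if m = 2 then (cc.1, cc.2 + 1) else cc)
        (0, 0)
    if r = 1 then
      if 1 ≤ cc.1 ∧ 2 ≤ L then 1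
      else if 2 ≤ cc.2 ∧ 3 ≤ L then 2
      else -1
    else
      if 1 ≤ cc.2 ∧ 2 ≤ L then 1
      else if 2 ≤ cc.1 ∧ 3 ≤ L then 2
      else -1

-- ===== PRECONDITION & SPEC =====
def Spec_solve (n : List Int) (out : Int) : Prop := out = solve_alt n
instance (n : List Int) (out : Int) : Decidable (Spec_solve n out) := by unfold Spec_solve; infer_instance

-- ===== CLAIM (what is proved, stated in full; the proofs are below) =====
def Claim_equal_solve : Prop := ∀ (n : List Int), Dom_solve n → Spec_solve n (solve n)

-- ===== LEMMAS AND PROOFS =====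

-- structural model of A's inner loop: bit m read least-significant-bit first along the list
def pvModel : List Int → Nat → Int × Int
  | [], _ => (0, 0)
  | x :: xs, m =>
    let sc := pvModel xs (m / 2)
    if m % 2 = 1 then (sc.1, sc.2 + 1) else (sc.1 + x, sc.2)

-- the deletion counts of all bitmasks whose kept sum is divisible by 3
def pvV (n : List Int) : List Int :=
  (List.range (2 ^ n.length)).filterMap
    (fun m => if (pvModel n m).1 % 3 = 0 then some ((pvModel n m).2) else none)

def pvSum (p : Nat → Bool) (v : Nat → Int) (l : List Nat) : Int × Int :=
  l.foldl (fun sc j => if p j then (sc.1, sc.2 + 1) else (sc.1 + v j, sc.2)) (0, 0)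

lemma pv_foldl_shift (p : Nat → Bool) (v : Nat → Int) :
    ∀ (l : List Nat) (a : Int × Int),
      l.foldl (fun sc j => if p j then (sc.1, sc.2 + 1) else (sc.1 + v j, sc.2)) a
        = (a.1 + (pvSum p v l).1, a.2 + (pvSum p v l).2) := by
  intro l
  induction l with
  | nil => intro a; simp [pvSum]
  | cons j l ih =>
    intro a
    have h2 : pvSum p v (j :: l)
        = ((if p j then ((0:Int), (0:Int) + 1) else ((0:Int) + v j, (0:Int))).1 + (pvSum p v l).1,
           (if p j then ((0:Int), (0:Int) + 1) else ((0:Int) + v j, (0:Int))).2 + (pvSum p v l).2) := by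
      simp only [pvSum, List.foldl_cons]
      exact ih _
    simp only [List.foldl_cons]
    rw [ih, h2]
    by_cases hp : p j <;> simp [hp, Prod.ext_iff] <;> omega

lemma pv_inner_eq : ∀ (n : List Int) (m : Nat),
    (List.range n.length).foldl
      (fun (sc : Int × Int) j =>
        if m.testBit j then (sc.1, sc.2 + 1) else (sc.1 + n.getD j 0, sc.2)) (0, 0)
      = pvModel n m := by
  intro n
  induction n with
  | nil => intro m; simp [pvModel]
  | cons x xs ih =>
    intro m
    have hlen : (x :: xs).length = xs.length + 1 := rfl
    rw [hlen, List.range_succ_eq_map, List.foldl_cons, List.foldl_map]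
    have hstep : (List.range xs.length).foldl
        (fun (sc : Int × Int) j =>
          if m.testBit j.succ then (sc.1, sc.2 + 1) else (sc.1 + (x :: xs).getD j.succ 0, sc.2))
        (if m.testBit 0 then ((0:Int), (0:Int) + 1) else ((0:Int) + (x :: xs).getD 0 0, (0:Int)))
        = (List.range xs.length).foldl
        (fun (sc : Int × Int) j =>
          if (m / 2).testBit j then (sc.1, sc.2 + 1) else (sc.1 + xs.getD j 0, sc.2))
        (if m.testBit 0 then ((0:Int), (0:Int) + 1) else ((0:Int) + (x :: xs).getD 0 0, (0:Int))) := by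
      apply PySem.List.foldl_congr_mem
      intro sc j _
      simp [Nat.succ_eq_add_one, Nat.testBit_add_one]
    rw [hstep, pv_foldl_shift]
    have hS : pvSum (fun j => (m / 2).testBit j) (fun j => xs.getD j 0) (List.range xs.length)
        = pvModel xs (m / 2) := by
      simp only [pvSum]
      exact ih (m / 2)
    rw [hS]
    have hbit : m.testBit 0 = decide (m % 2 = 1) := Nat.testBit_zero m
    by_cases hm : m % 2 = 1 <;>
      simp [pvModel, hm, hbit, Prod.ext_iff] <;> omega

lemma pv_cond (m j : Nat) :
    (PySem.Int.band (↑m) ((1 : Int) <<< (((j : Int)).toNat : Int)) ≠ 0) ↔ m.testBit j := by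
  have h : (1 : Int) <<< (((j : Int)).toNat : Int) = ((2 ^ j : Nat) : Int) := by
    rw [Int.toNat_natCast]; exact Int.one_shiftLeft j
  rw [h, PySem.Int.band_natCast]
  simp [Nat.and_two_pow, Nat.testBit]

lemma pv_foldl_ite_min (P : Nat → Prop) [DecidablePred P] (g : Nat → Int)
    (F : Int → Nat → Int) (hF : ∀ r m, F r m = if P m then min r (g m) else r) :
    ∀ (l : List Nat) (a : Int),
      l.foldl F a = (l.filterMap (fun m => if P m then some (g m) else none)).foldl min a := by
  intro l
  induction l with
  | nil => intro a; simp
  | cons m l ih =>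
    intro a
    by_cases hP : P m <;> simp [hF, hP, ih]

lemma pv_solve_eq (n : List Int) :
    solve n = (if (pvV n).foldl min (n.length : Int) < (n.length : Int)
               then (pvV n).foldl min (n.length : Int) else -1) := by
  have h3 : (0 : Int) < 3 := by norm_num
  have hsh : (1 : Int) <<< n.length = ((2 ^ n.length : Nat) : Int) := by
    rw [Int.shiftLeft_eq]; push_cast; ring
  have hinner : ∀ m : Nat,
      (PySem.List.pyRange 0 (n.length : Int) 1).foldl
        (fun (sc : Int × Int) i =>
          if PySem.Int.band (↑m) ((1 : Int) <<< i.toNat) ≠ 0 then (sc.1, sc.2 + 1)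
          else (sc.1 + PySem.List.pyGetD n i 0, sc.2)) (0, 0)
        = pvModel n m := by
    intro m
    rw [PySem.List.pyRange_zero_nat]
    simp only [List.foldl_map]
    have hcong : (List.range n.length).foldl
        (fun (sc : Int × Int) (j : Nat) =>
          if PySem.Int.band (↑m) ((1 : Int) <<< (((j : Int)).toNat : Int)) ≠ 0 then (sc.1, sc.2 + 1)
          else (sc.1 + PySem.List.pyGetD n (↑j) 0, sc.2)) (0, 0)
        = (List.range n.length).foldl
        (fun (sc : Int × Int) (j : Nat) =>
          if m.testBit j then (sc.1, sc.2 + 1) else (sc.1 + n.getD j 0, sc.2)) (0, 0) := by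
      apply PySem.List.foldl_congr_mem
      intro sc j _
      rw [PySem.List.pyGetD_natCast]
      by_cases hb : m.testBit j
      · rw [if_pos ((pv_cond m j).mpr hb), if_pos hb]
      · rw [if_neg (fun hx => hb ((pv_cond m j).mp hx)), if_neg hb]
    rw [hcong, pv_inner_eq]
  simp only [solve]
  rw [hsh, PySem.List.pyRange_zero_nat (2 ^ n.length)]
  simp only [List.foldl_map]
  have key : (List.range (2 ^ n.length)).foldl
      (fun (res : Int) (m : Nat) =>
        if PySem.Int.mod ((PySem.List.pyRange 0 (n.length : Int) 1).foldl
            (fun (sc : Int × Int) i =>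
              if PySem.Int.band (↑m) ((1 : Int) <<< i.toNat) ≠ 0 then (sc.1, sc.2 + 1)
              else (sc.1 + PySem.List.pyGetD n i 0, sc.2)) (0, 0)).1 3 = 0
        then min res ((PySem.List.pyRange 0 (n.length : Int) 1).foldl
            (fun (sc : Int × Int) i =>
              if PySem.Int.band (↑m) ((1 : Int) <<< i.toNat) ≠ 0 then (sc.1, sc.2 + 1)
              else (sc.1 + PySem.List.pyGetD n i 0, sc.2)) (0, 0)).2
        else res) (n.length : Int)
      = ((List.range (2 ^ n.length)).filterMap
          (fun m => if (pvModel n m).1 % 3 = 0 then some ((pvModel n m).2) else none)).foldl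
          min (n.length : Int) := by
    apply pv_foldl_ite_min (P := fun m => (pvModel n m).1 % 3 = 0) (g := fun m => (pvModel n m).2)
    intro r m
    rw [hinner m, PySem.Int.mod_eq_emod_of_pos h3]
  rw [key]
  rfl

-- every bitmask corresponds to a kept sublist, and conversely
lemma pv_model_sublist (n : List Int) : ∀ (m : Nat),
    ∃ t : List Int, t.Sublist n ∧ t.sum = (pvModel n m).1 ∧
      (t.length : Int) + (pvModel n m).2 = n.length := by
  induction n with
  | nil => intro m; exact ⟨[], by simp [pvModel]⟩
  | cons x xs ih =>
    intro m
    obtain ⟨t, hsub, hsum, hlen⟩ := ih (m / 2)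
    by_cases hm : m % 2 = 1
    · refine ⟨t, hsub.cons x, ?_, ?_⟩ <;> simp [pvModel, hm, hsum] <;> omega
    · refine ⟨x :: t, hsub.cons₂ x, ?_, ?_⟩ <;> simp [pvModel, hm, ← hsum]
      · ring
      · omega

lemma pv_sublist_model (n : List Int) : ∀ (t : List Int), t.Sublist n →
    ∃ m, m < 2 ^ n.length ∧ pvModel n m = (t.sum, (n.length : Int) - t.length) := by
  induction n with
  | nil =>
    intro t ht
    rw [List.sublist_nil.mp ht]
    exact ⟨0, by norm_num, by simp [pvModel]⟩
  | cons x xs ih =>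
    intro t ht
    rcases List.sublist_cons_iff.mp ht with h | ⟨r, rfl, hr⟩
    · obtain ⟨m, hm, heq⟩ := ih t h
      refine ⟨2 * m + 1, ?_, ?_⟩
      · have : (2:Nat) ^ (x :: xs).length = 2 ^ xs.length * 2 := by
          simp [List.length_cons, pow_succ]
        omega
      · have h1 : (2 * m + 1) % 2 = 1 := by omega
        have h2 : (2 * m + 1) / 2 = m := by omega
        simp only [pvModel, h1, h2, heq, if_pos]
        simp [List.length_cons]
        ring
    · obtain ⟨m, hm, heq⟩ := ih r hr
      refine ⟨2 * m, ?_, ?_⟩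
      · have : (2:Nat) ^ (x :: xs).length = 2 ^ xs.length * 2 := by
          simp [List.length_cons, pow_succ]
        omega
      · have h1 : ¬ ((2 * m) % 2 = 1) := by omega
        have h2 : (2 * m) / 2 = m := by omega
        simp only [pvModel, h1, h2, heq, ite_false]
        simp [List.length_cons, List.sum_cons]
        ring

lemma pv_mem_V (n : List Int) (v : Int) :
    v ∈ pvV n ↔ ∃ t : List Int, t.Sublist n ∧ t.sum % 3 = 0 ∧
      (t.length : Int) + v = n.length := by
  constructor
  · intro hv
    obtain ⟨m, _, hm⟩ := List.mem_filterMap.mp hv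
    split_ifs at hm with hP
    · obtain ⟨t, hsub, hsum, hlen⟩ := pv_model_sublist n m
      obtain rfl : (pvModel n m).2 = v := Option.some_injective _ hm
      exact ⟨t, hsub, by rw [hsum]; exact hP, hlen⟩
  · rintro ⟨t, hsub, ht3, hlv⟩
    obtain ⟨m, hm, heq⟩ := pv_sublist_model n t hsub
    refine List.mem_filterMap.mpr ⟨m, List.mem_range.mpr hm, ?_⟩
    rw [heq]
    simp only [ht3, if_pos]
    congr 1
    omega

lemma pv_out_k (n : List Int) (k : Int) (hmem : k ∈ pvV n)
    (hlb : ∀ v ∈ pvV n, k ≤ v) (hk : k < (n.length : Int)) : solve n = k := by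
  rw [pv_solve_eq]
  have h1 : (pvV n).foldl min (n.length : Int) ≤ k :=
    (PySem.List.foldl_min_le (pvV n) (n.length : Int)).2 k hmem
  have h2 : k ≤ (pvV n).foldl min (n.length : Int) := by
    rcases PySem.List.foldl_min_mem (pvV n) (n.length : Int) with h | h
    · omega
    · exact hlb _ h
  rw [if_pos (by omega)]
  omega

lemma pv_out_neg (n : List Int) (hlb : ∀ v ∈ pvV n, (n.length : Int) ≤ v) :
    solve n = -1 := by
  rw [pv_solve_eq]
  have h1 : (pvV n).foldl min (n.length : Int) ≤ (n.length : Int) :=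
    (PySem.List.foldl_min_le (pvV n) (n.length : Int)).1
  have h2 : (n.length : Int) ≤ (pvV n).foldl min (n.length : Int) := by
    rcases PySem.List.foldl_min_mem (pvV n) (n.length : Int) with h | h
    · omega
    · exact hlb _ h
  rw [if_neg (by omega)]

-- residue counting
def pvC (r : Int) (l : List Int) : Nat := l.countP (fun x => x % 3 == r)

lemma pv_sum_mod (l : List Int) :
    l.sum % 3 = (((pvC 1 l : Int)) + 2 * ((pvC 2 l : Int))) % 3 := by
  induction l with
  | nil => simp [pvC]
  | cons x xs ih =>
    have hx : x % 3 = 0 ∨ x % 3 = 1 ∨ x % 3 = 2 := by omega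
    simp only [pvC, List.countP_cons, List.sum_cons] at *
    rcases hx with hx | hx | hx <;> simp [hx] <;> push_cast <;> omega

lemma pv_len_eq (l : List Int) : pvC 0 l + pvC 1 l + pvC 2 l = l.length := by
  induction l with
  | nil => simp [pvC]
  | cons x xs ih =>
    have hx : x % 3 = 0 ∨ x % 3 = 1 ∨ x % 3 = 2 := by omega
    simp only [pvC, List.countP_cons, List.length_cons] at *
    rcases hx with hx | hx | hx <;> simp [hx] <;> omega

lemma pv_pick1 (p : Int → Bool) : ∀ (n : List Int), 1 ≤ n.countP p →
    ∃ (t : List Int) (y : Int), t.Sublist n ∧ p y ∧ t.length + 1 = n.length ∧ t.sum + y = n.sum := by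
  intro n
  induction n with
  | nil => intro h; simp at h
  | cons x xs ih =>
    intro h
    by_cases hpx : p x
    · exact ⟨xs, x, List.sublist_cons_self x xs, hpx, by simp, by simp [List.sum_cons]; ring⟩
    · have hc : 1 ≤ xs.countP p := by
        rw [List.countP_cons, if_neg hpx] at h; omega
      obtain ⟨t, y, hsub, hpy, hlen, hsum⟩ := ih hc
      refine ⟨x :: t, y, hsub.cons₂ x, hpy, by simp [hlen], ?_⟩
      simp only [List.sum_cons]
      rw [← hsum]; ring

lemma pv_pick2 (p : Int → Bool) : ∀ (n : List Int), 2 ≤ n.countP p →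
    ∃ (t : List Int) (y z : Int), t.Sublist n ∧ p y ∧ p z ∧ t.length + 2 = n.length ∧ t.sum + y + z = n.sum := by
  intro n
  induction n with
  | nil => intro h; simp at h
  | cons x xs ih =>
    intro h
    by_cases hpx : p x
    · have hc : 1 ≤ xs.countP p := by
        rw [List.countP_cons, if_pos hpx] at h; omega
      obtain ⟨t, y, hsub, hpy, hlen, hsum⟩ := pv_pick1 p xs hc
      refine ⟨t, y, x, hsub.cons x, hpy, hpx, by simp [← hlen], ?_⟩
      simp only [List.sum_cons]
      rw [← hsum]; ring
    · have hc : 2 ≤ xs.countP p := by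
        rw [List.countP_cons, if_neg hpx] at h; omega
      obtain ⟨t, y, z, hsub, hpy, hpz, hlen, hsum⟩ := ih hc
      refine ⟨x :: t, y, z, hsub.cons₂ x, hpy, hpz, by simp [← hlen], ?_⟩
      simp only [List.sum_cons]
      rw [← hsum]; ring

lemma pv_counts_pack (t n : List Int) (h : t.Sublist n) :
    pvC 0 t ≤ pvC 0 n ∧ pvC 1 t ≤ pvC 1 n ∧ pvC 2 t ≤ pvC 2 n :=
  ⟨h.countP_le, h.countP_le, h.countP_le⟩

lemma pv_no_one1 (n t : List Int) (hsub : t.Sublist n) (hl : t.length + 1 = n.length)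
    (ht : t.sum % 3 = 0) (hr : n.sum % 3 = 1) (hc : pvC 1 n = 0) : False := by
  have h1 := pv_sum_mod n
  have h2 := pv_sum_mod t
  have h3 := pv_len_eq n
  have h4 := pv_len_eq t
  have h5 := pv_counts_pack t n hsub
  omega

lemma pv_no_one2 (n t : List Int) (hsub : t.Sublist n) (hl : t.length + 1 = n.length)
    (ht : t.sum % 3 = 0) (hr : n.sum % 3 = 2) (hc : pvC 2 n = 0) : False := by
  have h1 := pv_sum_mod n
  have h2 := pv_sum_mod t
  have h3 := pv_len_eq n
  have h4 := pv_len_eq t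
  have h5 := pv_counts_pack t n hsub
  omega

lemma pv_v_pos (n : List Int) (hr : n.sum % 3 ≠ 0) : ∀ v ∈ pvV n, 1 ≤ v := by
  intro v hv
  obtain ⟨t, hsub, ht3, hlv⟩ := (pv_mem_V n v).mp hv
  have hle : t.length ≤ n.length := hsub.length_le
  by_contra hlt
  have hlen : t.length = n.length := by omega
  rw [hsub.eq_of_length hlen] at ht3
  exact hr ht3

-- B's counter loop computes the two residue counts
lemma pv_cc (n : List Int) :
    n.foldl
      (fun (cc : Int × Int) x =>
        if x % 3 = 1 then (cc.1 + 1, cc.2) else if x % 3 = 2 then (cc.1, cc.2 + 1) else cc)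
      (0, 0) = ((pvC 1 n : Int), (pvC 2 n : Int)) := by
  suffices h : ∀ (l : List Int) (a : Int × Int),
      l.foldl
        (fun (cc : Int × Int) x =>
          if x % 3 = 1 then (cc.1 + 1, cc.2) else if x % 3 = 2 then (cc.1, cc.2 + 1) else cc)
        a = (a.1 + (pvC 1 l : Int), a.2 + (pvC 2 l : Int)) by
    rw [h]; simp
  intro l
  induction l with
  | nil => intro a; simp [pvC]
  | cons x xs ih =>
    intro a
    have hx : x % 3 = 0 ∨ x % 3 = 1 ∨ x % 3 = 2 := by omega
    simp only [List.foldl_cons]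
    rcases hx with hx | hx | hx <;>
      (simp only [hx]; norm_num; rw [ih]; simp [pvC, hx, Prod.ext_iff]) <;> try omega

theorem pv_main (n : List Int) : solve n = solve_alt n := by
  have h3 : (0 : Int) < 3 := by norm_num
  have hsum := pv_sum_mod n
  have hlen := pv_len_eq n
  by_cases hnil : n = []
  · subst hnil; decide
  have hL1 : 1 ≤ n.length := by
    cases n with
    | nil => exact absurd rfl hnil
    | cons a l => simp
  by_cases hr0 : n.sum % 3 = 0
  · -- answer 0
    have hA : solve n = 0 := by
      apply pv_out_k
      · exact (pv_mem_V n 0).mpr ⟨n, List.Sublist.refl n, hr0, by omega⟩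
      · intro v hv
        obtain ⟨t, hsub, _, hlv⟩ := (pv_mem_V n v).mp hv
        have := hsub.length_le
        omega
      · omega
    have hB : solve_alt n = 0 := by
      simp only [solve_alt, pv_cc, PySem.Int.mod_eq_emod_of_pos h3]
      split_ifs <;> omega
    rw [hA, hB]
  · have hpos := pv_v_pos n hr0
    have hr12 : n.sum % 3 = 1 ∨ n.sum % 3 = 2 := by omega
    rcases hr12 with hr | hr
    · -- residue 1
      by_cases hgood : 1 ≤ pvC 1 n ∧ 2 ≤ n.length
      · -- answer 1: remove one residue-1 element
        obtain ⟨t, y, hsub, hpy, hlent, hsumt⟩ := pv_pick1 _ n hgood.1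
        have hy : y % 3 = 1 := by simpa using hpy
        have hA : solve n = 1 := by
          apply pv_out_k
          · exact (pv_mem_V n 1).mpr ⟨t, hsub, by omega, by omega⟩
          · exact hpos
          · omega
        have hB : solve_alt n = 1 := by
          simp only [solve_alt, pv_cc, PySem.Int.mod_eq_emod_of_pos h3]
          split_ifs <;> omega
        rw [hA, hB]
      · by_cases hc1 : 1 ≤ pvC 1 n
        · -- then length is 1: answer -1
          have hL : n.length = 1 := by omega
          have hA : solve n = -1 := by
            apply pv_out_neg
            intro v hv
            have := hpos v hv
            omega
          have hB : solve_alt n = -1 := by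
            simp only [solve_alt, pv_cc, PySem.Int.mod_eq_emod_of_pos h3]
            split_ifs <;> omega
          rw [hA, hB]
        · -- no residue-1 element: then pvC 2 n ≥ 2; answer 2 or -1
          have hc1z : pvC 1 n = 0 := by omega
          have hc2 : 2 ≤ pvC 2 n := by omega
          have hv2 : ∀ v ∈ pvV n, 2 ≤ v := by
            intro v hv
            have h1 := hpos v hv
            obtain ⟨t, hsub, ht3, hlv⟩ := (pv_mem_V n v).mp hv
            by_contra hlt
            have hlen1 : t.length + 1 = n.length := by omega
            exact pv_no_one1 n t hsub hlen1 ht3 hr hc1z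
          by_cases hL3 : 3 ≤ n.length
          · -- answer 2: remove two residue-2 elements
            obtain ⟨t, y, z, hsub, hpy, hpz, hlent, hsumt⟩ := pv_pick2 _ n hc2
            have hy : y % 3 = 2 := by simpa using hpy
            have hz : z % 3 = 2 := by simpa using hpz
            have hA : solve n = 2 := by
              apply pv_out_k
              · exact (pv_mem_V n 2).mpr ⟨t, hsub, by omega, by omega⟩
              · exact hv2
              · omega
            have hB : solve_alt n = 2 := by
              simp only [solve_alt, pv_cc, PySem.Int.mod_eq_emod_of_pos h3]
              split_ifs <;> omega
            rw [hA, hB]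
          · -- length 2, no removal keeps a digit: answer -1
            have hA : solve n = -1 := by
              apply pv_out_neg
              intro v hv
              have := hv2 v hv
              omega
            have hB : solve_alt n = -1 := by
              simp only [solve_alt, pv_cc, PySem.Int.mod_eq_emod_of_pos h3]
              split_ifs <;> omega
            rw [hA, hB]
    · -- residue 2 (mirror)
      by_cases hgood : 1 ≤ pvC 2 n ∧ 2 ≤ n.length
      · obtain ⟨t, y, hsub, hpy, hlent, hsumt⟩ := pv_pick1 _ n hgood.1
        have hy : y % 3 = 2 := by simpa using hpy
        have hA : solve n = 1 := by
          apply pv_out_k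
          · exact (pv_mem_V n 1).mpr ⟨t, hsub, by omega, by omega⟩
          · exact hpos
          · omega
        have hB : solve_alt n = 1 := by
          simp only [solve_alt, pv_cc, PySem.Int.mod_eq_emod_of_pos h3]
          split_ifs <;> omega
        rw [hA, hB]
      · by_cases hc2 : 1 ≤ pvC 2 n
        · have hL : n.length = 1 := by omega
          have hA : solve n = -1 := by
            apply pv_out_neg
            intro v hv
            have := hpos v hv
            omega
          have hB : solve_alt n = -1 := by
            simp only [solve_alt, pv_cc, PySem.Int.mod_eq_emod_of_pos h3]
            split_ifs <;> omega
          rw [hA, hB]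
        · have hc2z : pvC 2 n = 0 := by omega
          have hc1 : 2 ≤ pvC 1 n := by omega
          have hv2 : ∀ v ∈ pvV n, 2 ≤ v := by
            intro v hv
            have h1 := hpos v hv
            obtain ⟨t, hsub, ht3, hlv⟩ := (pv_mem_V n v).mp hv
            by_contra hlt
            have hlen1 : t.length + 1 = n.length := by omega
            exact pv_no_one2 n t hsub hlen1 ht3 hr hc2z
          by_cases hL3 : 3 ≤ n.length
          · obtain ⟨t, y, z, hsub, hpy, hpz, hlent, hsumt⟩ := pv_pick2 _ n hc1
            have hy : y % 3 = 1 := by simpa using hpy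
            have hz : z % 3 = 1 := by simpa using hpz
            have hA : solve n = 2 := by
              apply pv_out_k
              · exact (pv_mem_V n 2).mpr ⟨t, hsub, by omega, by omega⟩
              · exact hv2
              · omega
            have hB : solve_alt n = 2 := by
              simp only [solve_alt, pv_cc, PySem.Int.mod_eq_emod_of_pos h3]
              split_ifs <;> omega
            rw [hA, hB]
          · have hA : solve n = -1 := by
              apply pv_out_neg
              intro v hv
              have := hv2 v hv
              omega
            have hB : solve_alt n = -1 := by
              simp only [solve_alt, pv_cc, PySem.Int.mod_eq_emod_of_pos h3]
              split_ifs <;> omega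
            rw [hA, hB]

-- ===== VERDICT (by name: the statement is the Claim_ definition above) =====
theorem solve_spec : Claim_equal_solve := by
  intro n _
  unfold Spec_solve
  exact pv_main n
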